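-- pv_equiv track=rewrite | github.com/tonyx555/homerun | backend/workers/market_data_worker.py | _split_token_universe
-- ===== SOURCE A (Python) =====
-- def _is_polymarket_token(token_id: str) -> bool:
--     token = str(token_id or "").strip()
--     if not token:
--         return False
--     lower = token.lower()
--     return lower.startswith("0x") or len(token) > 20
--
-- def _split_token_universe(tokens: set[str]) -> tuple[list[str], list[str]]:
--     polymarket_tokens: list[str] = []
--     kalshi_tokens: list[str] = []
--     for token in sorted(tokens):
--         if _is_polymarket_token(token):
--             polymarket_tokens.append(token)
--         else:
--             kalshi_tokens.append(token)
--     return polymarket_tokens, kalshi_tokens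
-- ===== SOURCE B (Python) =====
-- def _is_polymarket_token_b(token_id: str) -> bool:
--     token = str(token_id or "").strip()
--     if not token:
--         return False
--     lower = token.lower()
--     return lower.startswith("0x") or len(token) > 20
--
-- def _split_token_universe(tokens):
--     polymarket_tokens = [t for t in tokens if _is_polymarket_token_b(t)]
--     kalshi_tokens = [t for t in tokens if not _is_polymarket_token_b(t)]
--     return sorted(polymarket_tokens), sorted(kalshi_tokens)
-- ===== Notes on version B (the rewrite author's own statement) =====
-- stated objective: alternative
-- what changed: B partitions the raw tokens into the two buckets first (two filter comprehensions) and sorts each bucket independently, instead of A's sort-the-whole-set-first then one classifying loop with two accumulators.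
import Mathlib
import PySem

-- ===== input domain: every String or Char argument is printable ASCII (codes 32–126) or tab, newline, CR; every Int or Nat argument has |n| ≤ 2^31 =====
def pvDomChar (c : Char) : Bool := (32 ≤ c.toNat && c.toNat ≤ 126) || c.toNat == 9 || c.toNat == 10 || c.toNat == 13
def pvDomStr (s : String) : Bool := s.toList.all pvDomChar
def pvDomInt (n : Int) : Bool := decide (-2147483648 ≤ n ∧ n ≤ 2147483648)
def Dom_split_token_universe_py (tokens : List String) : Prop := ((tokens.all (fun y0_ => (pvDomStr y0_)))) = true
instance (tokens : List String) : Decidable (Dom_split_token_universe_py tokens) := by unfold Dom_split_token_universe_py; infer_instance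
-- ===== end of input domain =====

-- B partitions the raw tokens first and sorts each bucket independently, instead of A's
-- sort-everything-first then a single classifying loop (alternative decomposition, same cost).


-- ===== PORT A =====
-- port of _is_polymarket_token ('token_id or ""' on a str is the string itself when non-empty, "" when empty)
def is_polymarket_token_py (token_id : String) : Bool :=
  let token := PySem.Str.strip (if token_id = "" then "" else token_id)
  if token = "" then false
  else
    let lower := PySem.Str.lower token
    PySem.Str.startswith lower "0x" || decide (PySem.Str.len token > 20)

def split_token_universe_py (tokens : List String) : List String × List String :=
  (PySem.List.sorted tokens (fun x => x) false).foldl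
    (fun (st : List String × List String) token =>
      if is_polymarket_token_py token then (st.1 ++ [token], st.2)
      else (st.1, st.2 ++ [token]))
    ([], [])

-- ===== PORT B =====
def is_polymarket_token_py_b (token_id : String) : Bool :=
  let token := PySem.Str.strip (if token_id = "" then "" else token_id)
  if token = "" then false
  else
    let lower := PySem.Str.lower token
    PySem.Str.startswith lower "0x" || decide (PySem.Str.len token > 20)

def split_token_universe_py_alt (tokens : List String) : List String × List String :=
  let polymarket_tokens := tokens.filter (fun t => is_polymarket_token_py_b t)
  let kalshi_tokens := tokens.filter (fun t => !is_polymarket_token_py_b t)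
  (PySem.List.sorted polymarket_tokens (fun x => x) false,
   PySem.List.sorted kalshi_tokens (fun x => x) false)

-- ===== PRECONDITION & SPEC =====
def Spec_split_token_universe_py (tokens : List String) (out : List String × List String) : Prop := out = split_token_universe_py_alt tokens
instance (tokens : List String) (out : List String × List String) : Decidable (Spec_split_token_universe_py tokens out) := by unfold Spec_split_token_universe_py; infer_instance

-- ===== CLAIM (what is proved, stated in full; the proofs are below) =====
def Claim_equal_split_token_universe_py : Prop := ∀ (tokens : List String), Dom_split_token_universe_py tokens → Spec_split_token_universe_py tokens (split_token_universe_py tokens)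

-- ===== LEMMAS AND PROOFS =====

-- the two transliterated predicates are the same function
theorem pred_eq (t : String) : is_polymarket_token_py_b t = is_polymarket_token_py t := rfl

-- A's classifying loop computes the two filters of the list it walks
theorem foldl_split (p : String → Bool) (l : List String) (acc : List String × List String) :
    l.foldl (fun (st : List String × List String) token =>
      if p token then (st.1 ++ [token], st.2) else (st.1, st.2 ++ [token])) acc
    = (acc.1 ++ l.filter p, acc.2 ++ l.filter (fun t => !p t)) := by
  induction l generalizing acc with
  | nil => simp
  | cons x xs ih =>
    simp only [List.foldl_cons, List.filter_cons]
    by_cases h : p x <;> simp [h, ih]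

-- filtering commutes with sorting (identity key)
theorem filter_sorted (p : String → Bool) (l : List String) :
    (PySem.List.sorted l (fun x => x) false).filter p
    = PySem.List.sorted (l.filter p) (fun x => x) false := by
  have hperm := (PySem.List.sorted_perm l (fun x => x) false).filter p
  have hpw := List.Pairwise.sublist (List.filter_sublist (p := p))
    (PySem.List.sorted_pairwise l (fun x => x))
  exact (PySem.List.sorted_id_eq_of_perm_of_pairwise (List.filter p l)
    (List.filter p (PySem.List.sorted l (fun x => x) false)) hperm hpw).symm

-- ===== VERDICT (by name: the statement is the Claim_ definition above) =====
theorem split_token_universe_py_spec : Claim_equal_split_token_universe_py := by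
  intro tokens _
  show split_token_universe_py tokens = split_token_universe_py_alt tokens
  unfold split_token_universe_py split_token_universe_py_alt
  rw [foldl_split]
  simp only [List.nil_append, pred_eq, filter_sorted]
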